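-- pv_equiv track=rewrite | github.com/S-Christensen/cartographersStudy | backend/scoringCards.py | magesValley
-- ===== SOURCE A (Python) =====
-- def magesValley(grid):
--     points = 0
--     for r in range(len(grid)):
--         for c in range(len(grid[0])):
--             if grid[r][c] in ["Water", "Farm"]:
--                 value = 2 if grid[r][c] == "Water" else 1
--                 for dr, dc in [(1,0), (-1,0), (0,1), (0,-1)]:
--                     nr, nc = r + dr, c + dc
--                     if 0 <= nr < len(grid) and 0 <= nc < len(grid[0]) and grid[nr][nc] == "Mountain":
--                         points += value
--                         break
--     return points
-- ===== SOURCE B (Python) =====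
-- def magesValley(grid):
--     if not grid:
--         return 0
--     h, w = len(grid), len(grid[0])
--     mountains = [(r, c) for r in range(h) for c in range(w) if grid[r][c] == "Mountain"]
--     qualifying = set()
--     for r, c in mountains:
--         for nr, nc in ((r + 1, c), (r - 1, c), (r, c + 1), (r, c - 1)):
--             if 0 <= nr < h and 0 <= nc < w and grid[nr][nc] in ("Water", "Farm"):
--                 qualifying.add((nr, nc))
--     return sum(2 if grid[r][c] == "Water" else 1 for r, c in qualifying)
-- ===== Notes on version B (the rewrite author's own statement) =====
-- stated objective: alternative
-- what changed: B inverts the scan: it collects all Mountain positions first, marks each in-bounds Water/Farm orthogonal neighbor of a mountain in a set (deduplicating cells adjacent to several mountains), and sums 2 per Water and 1 per Farm cell in the set, instead of A's per-cell neighbor probe with break.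
import Mathlib
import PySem

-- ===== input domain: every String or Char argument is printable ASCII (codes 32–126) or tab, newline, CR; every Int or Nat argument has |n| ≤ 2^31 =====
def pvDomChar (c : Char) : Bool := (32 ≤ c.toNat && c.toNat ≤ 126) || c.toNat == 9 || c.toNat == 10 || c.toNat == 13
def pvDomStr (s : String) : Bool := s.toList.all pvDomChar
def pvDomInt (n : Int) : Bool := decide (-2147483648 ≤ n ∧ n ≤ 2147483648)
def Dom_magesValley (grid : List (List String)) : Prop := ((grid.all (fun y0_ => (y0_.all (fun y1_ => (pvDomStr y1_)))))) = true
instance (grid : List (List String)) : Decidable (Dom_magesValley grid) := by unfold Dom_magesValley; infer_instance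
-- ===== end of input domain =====

-- B inverts the scan: it collects Mountain positions, marks their in-bounds Water/Farm neighbors in a set, and sums the set (alternative decomposition, not claimed faster).

-- grid[r][c], totalized with "" (every use below is bounds-guarded, or in bounds under Pre_)
def pvCell (grid : List (List String)) (r c : Int) : String :=
  (PySem.List.pyGet? ((PySem.List.pyGet? grid r).getD []) c).getD ""
-- ===== PORT A =====
def pvOffs : List (Int × Int) := [(1,0),(-1,0),(0,1),(0,-1)]
def pvBreakScan (grid : List (List String)) (r c : Int) : List (Int × Int) → Bool
  | [] => false
  | d :: rest =>
    if 0 ≤ r + d.1 ∧ r + d.1 < (grid.length : Int) ∧ 0 ≤ c + d.2 ∧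
        c + d.2 < (((grid.headD []).length : Int)) ∧ pvCell grid (r + d.1) (c + d.2) = "Mountain"
    then true else pvBreakScan grid r c rest
def magesValley (grid : List (List String)) : Int :=
  (PySem.List.pyRange 0 grid.length 1).foldl (fun points r =>
    (PySem.List.pyRange 0 (grid.headD []).length 1).foldl (fun points c =>
      if pvCell grid r c = "Water" ∨ pvCell grid r c = "Farm" then
        let value : Int := if pvCell grid r c = "Water" then 2 else 1
        if pvBreakScan grid r c pvOffs then points + value else points
      else points) points) 0
-- ===== PORT B =====
def pvNbrs (p : Int × Int) : List (Int × Int) :=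
  [(p.1 + 1, p.2), (p.1 - 1, p.2), (p.1, p.2 + 1), (p.1, p.2 - 1)]
def magesValley_alt (grid : List (List String)) : Int :=
  if grid.length = 0 then 0
  else
    let mountains : List (Int × Int) :=
      (PySem.List.pyRange 0 grid.length 1).flatMap (fun r =>
        ((PySem.List.pyRange 0 (grid.headD []).length 1).filter
          (fun c => pvCell grid r c == "Mountain")).map (fun c => (r, c)))
    let qualifying : PySem.Set (Int × Int) :=
      mountains.foldl (fun s p =>
        (pvNbrs p).foldl (fun s n =>
          if (0 ≤ n.1 ∧ n.1 < (grid.length : Int) ∧ 0 ≤ n.2 ∧ n.2 < ((grid.headD []).length : Int)) ∧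
              (pvCell grid n.1 n.2 = "Water" ∨ pvCell grid n.1 n.2 = "Farm")
          then PySem.Set.add s n else s) s) PySem.Set.empty
    qualifying.foldl (fun acc p => acc + (if pvCell grid p.1 p.2 = "Water" then 2 else 1)) 0


-- ===== PRECONDITION & SPEC =====
-- Pre_ excludes exactly the jagged grids on which Python A raises IndexError: some row shorter
-- than row 0 (A indexes every row at all columns below len(grid[0])); B raises there too.
def Pre_magesValley (grid : List (List String)) : Prop :=
  ∀ row ∈ grid, (grid.headD []).length ≤ row.length
instance (grid : List (List String)) : Decidable (Pre_magesValley grid) := by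
  unfold Pre_magesValley; infer_instance

def pvWitness_magesValley : List (List String) := [["Water", "Mountain"], ["Farm", "Forest"]]

def Spec_magesValley (grid : List (List String)) (out : Int) : Prop := out = magesValley_alt grid
instance (grid : List (List String)) (out : Int) : Decidable (Spec_magesValley grid out) := by
  unfold Spec_magesValley; infer_instance

-- ===== CLAIM (what is proved, stated in full; the proofs are below) =====
def Claim_equal_magesValley : Prop := ∀ (grid : List (List String)), Dom_magesValley grid → Pre_magesValley grid → Spec_magesValley grid (magesValley grid)

-- ===== LEMMAS AND PROOFS =====

def pvInR (grid : List (List String)) (p : Int × Int) : Bool :=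
  decide (0 ≤ p.1) && decide (p.1 < (grid.length : Int)) &&
  decide (0 ≤ p.2) && decide (p.2 < ((grid.headD []).length : Int))
def pvQb (grid : List (List String)) (p : Int × Int) : Bool :=
  pvInR grid p &&
  (pvCell grid p.1 p.2 == "Water" || pvCell grid p.1 p.2 == "Farm") &&
  pvOffs.any (fun d => pvInR grid (p.1 + d.1, p.2 + d.2) &&
    (pvCell grid (p.1 + d.1) (p.2 + d.2) == "Mountain"))
def pvVal (grid : List (List String)) (p : Int × Int) : Int :=
  if pvCell grid p.1 p.2 = "Water" then 2 else 1
def pvCondA (grid : List (List String)) (r c : Int) : Bool :=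
  (pvCell grid r c == "Water" || pvCell grid r c == "Farm") && pvBreakScan grid r c pvOffs

theorem pv_breakScan_iff (grid : List (List String)) (r c : Int) (l : List (Int × Int)) :
    pvBreakScan grid r c l = true ↔
      ∃ d ∈ l, (0 ≤ r + d.1 ∧ r + d.1 < (grid.length : Int) ∧ 0 ≤ c + d.2 ∧
        c + d.2 < ((grid.headD []).length : Int) ∧ pvCell grid (r + d.1) (c + d.2) = "Mountain") := by
  induction l with
  | nil => simp [pvBreakScan]
  | cons d rest ih =>
    simp only [pvBreakScan, List.mem_cons]
    split_ifs with h
    · simp only [true_iff]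
      exact ⟨d, Or.inl rfl, h⟩
    · rw [ih]
      constructor
      · rintro ⟨e, he, hc⟩; exact ⟨e, Or.inr he, hc⟩
      · rintro ⟨e, he | he, hc⟩
        · exact absurd (he ▸ hc) h
        · exact ⟨e, he, hc⟩

theorem pv_sum_ite_filter {α : Type} (l : List α) (p : α → Bool) (f : α → Int) :
    (l.map (fun x => if p x then f x else 0)).sum = ((l.filter p).map f).sum := by
  induction l with
  | nil => simp
  | cons a l ih => by_cases h : p a <;> simp [h, ih]

theorem pv_mem_inner_foldl {α : Type} [BEq α] [LawfulBEq α] (C : α → Prop) [DecidablePred C]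
    (l : List α) (s : List α) (y : α) :
    (y ∈ l.foldl (fun s n => if C n then PySem.Set.add s n else s) s) ↔
      y ∈ s ∨ (y ∈ l ∧ C y) := by
  induction l generalizing s with
  | nil => simp
  | cons a l ih =>
    simp only [List.foldl_cons, List.mem_cons, ih]
    split_ifs with h
    · rw [PySem.Set.mem_add]
      constructor
      · rintro ((hs | rfl) | ⟨hl, hc⟩)
        · exact Or.inl hs
        · exact Or.inr ⟨Or.inl rfl, h⟩
        · exact Or.inr ⟨Or.inr hl, hc⟩
      · rintro (hs | ⟨(rfl | hl), hc⟩)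
        · exact Or.inl (Or.inl hs)
        · exact Or.inl (Or.inr rfl)
        · exact Or.inr ⟨hl, hc⟩
    · constructor
      · rintro (hs | ⟨hl, hc⟩)
        · exact Or.inl hs
        · exact Or.inr ⟨Or.inr hl, hc⟩
      · rintro (hs | ⟨(rfl | hl), hc⟩)
        · exact Or.inl hs
        · exact absurd hc h
        · exact Or.inr ⟨hl, hc⟩

theorem pv_nodup_inner_foldl {α : Type} [BEq α] [LawfulBEq α] (C : α → Prop) [DecidablePred C]
    (l : List α) (s : List α) (hs : s.Nodup) :
    (l.foldl (fun s n => if C n then PySem.Set.add s n else s) s).Nodup := by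
  induction l generalizing s with
  | nil => exact hs
  | cons a l ih =>
    simp only [List.foldl_cons]
    apply ih
    split_ifs with h
    · exact PySem.Set.nodup_add _ _ hs
    · exact hs

theorem pv_mem_outer_foldl {α β : Type} [BEq α] [LawfulBEq α] (C : α → Prop) [DecidablePred C]
    (nb : β → List α) (ms : List β) (s : List α) (y : α) :
    (y ∈ ms.foldl (fun s m => (nb m).foldl (fun s n => if C n then PySem.Set.add s n else s) s) s) ↔
      y ∈ s ∨ ∃ m ∈ ms, y ∈ nb m ∧ C y := by
  induction ms generalizing s with
  | nil => simp
  | cons a ms ih =>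
    simp only [List.foldl_cons, ih, pv_mem_inner_foldl, List.mem_cons]
    constructor
    · rintro ((hs | ⟨hn, hc⟩) | ⟨m, hm, hn, hc⟩)
      · exact Or.inl hs
      · exact Or.inr ⟨a, Or.inl rfl, hn, hc⟩
      · exact Or.inr ⟨m, Or.inr hm, hn, hc⟩
    · rintro (hs | ⟨m, rfl | hm, hn, hc⟩)
      · exact Or.inl (Or.inl hs)
      · exact Or.inl (Or.inr ⟨hn, hc⟩)
      · exact Or.inr ⟨m, hm, hn, hc⟩

theorem pv_nodup_outer_foldl {α β : Type} [BEq α] [LawfulBEq α] (C : α → Prop) [DecidablePred C]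
    (nb : β → List α) (ms : List β) (s : List α) (hs : s.Nodup) :
    (ms.foldl (fun s m => (nb m).foldl (fun s n => if C n then PySem.Set.add s n else s) s) s).Nodup := by
  induction ms generalizing s with
  | nil => exact hs
  | cons a ms ih => exact ih _ (pv_nodup_inner_foldl _ _ _ hs)

theorem pv_mem_nbrs (m y : Int × Int) :
    y ∈ pvNbrs m ↔ ∃ d ∈ pvOffs, m = (y.1 + d.1, y.2 + d.2) := by
  obtain ⟨a, b⟩ := m; obtain ⟨x, z⟩ := y
  simp [pvNbrs, pvOffs, Prod.ext_iff]
  constructor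
  · rintro (⟨rfl, rfl⟩ | ⟨rfl, rfl⟩ | ⟨rfl, rfl⟩ | ⟨rfl, rfl⟩)
    · exact ⟨-1, 0, by norm_num, by ring, by ring⟩
    · exact ⟨1, 0, by norm_num, by ring, by ring⟩
    · exact ⟨0, -1, by norm_num, by ring, by ring⟩
    · exact ⟨0, 1, by norm_num, by ring, by ring⟩
  · rintro ⟨d1, d2, (⟨rfl, rfl⟩ | ⟨rfl, rfl⟩ | ⟨rfl, rfl⟩ | ⟨rfl, rfl⟩), rfl, rfl⟩ <;> norm_num

theorem pv_mem_mountains (grid : List (List String)) (m : Int × Int) :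
    m ∈ (PySem.List.pyRange 0 grid.length 1).flatMap (fun r =>
        ((PySem.List.pyRange 0 (grid.headD []).length 1).filter
          (fun c => pvCell grid r c == "Mountain")).map (fun c => (r, c))) ↔
      (0 ≤ m.1 ∧ m.1 < (grid.length : Int) ∧ 0 ≤ m.2 ∧ m.2 < ((grid.headD []).length : Int)) ∧
        pvCell grid m.1 m.2 = "Mountain" := by
  obtain ⟨r, c⟩ := m
  simp [List.mem_flatMap, List.mem_filter, List.mem_map, PySem.List.mem_pyRange_one]
  aesop

theorem pv_mem_qual (grid : List (List String)) (y : Int × Int) :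
    (y ∈ ((PySem.List.pyRange 0 grid.length 1).flatMap (fun r =>
        ((PySem.List.pyRange 0 (grid.headD []).length 1).filter
          (fun c => pvCell grid r c == "Mountain")).map (fun c => (r, c)))).foldl
      (fun s p => (pvNbrs p).foldl (fun s n =>
          if (0 ≤ n.1 ∧ n.1 < (grid.length : Int) ∧ 0 ≤ n.2 ∧ n.2 < ((grid.headD []).length : Int)) ∧
              (pvCell grid n.1 n.2 = "Water" ∨ pvCell grid n.1 n.2 = "Farm")
          then PySem.Set.add s n else s) s) PySem.Set.empty) ↔
      pvQb grid y = true := by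
  rw [pv_mem_outer_foldl (C := fun n : Int × Int =>
    (0 ≤ n.1 ∧ n.1 < (grid.length : Int) ∧ 0 ≤ n.2 ∧ n.2 < ((grid.headD []).length : Int)) ∧
      (pvCell grid n.1 n.2 = "Water" ∨ pvCell grid n.1 n.2 = "Farm")) (nb := pvNbrs)]
  simp only [PySem.Set.empty, List.not_mem_nil, false_or]
  unfold pvQb pvInR
  simp only [List.any_eq_true, Bool.and_eq_true, Bool.or_eq_true, beq_iff_eq, decide_eq_true_eq]
  constructor
  · rintro ⟨m, hm, hn, hb, hwf⟩
    rw [pv_mem_mountains] at hm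
    rw [pv_mem_nbrs] at hn
    obtain ⟨d, hd, rfl⟩ := hn
    obtain ⟨⟨m1, m2, m3, m4⟩, hmtn⟩ := hm
    exact ⟨⟨⟨⟨⟨hb.1, hb.2.1⟩, hb.2.2.1⟩, hb.2.2.2⟩, hwf⟩, d, hd, ⟨⟨⟨m1, m2⟩, m3⟩, m4⟩, hmtn⟩
  · rintro ⟨⟨⟨⟨⟨h1, h2⟩, h3⟩, h4⟩, hwf⟩, d, hd, ⟨⟨⟨b1, b2⟩, b3⟩, b4⟩, hmtn⟩
    refine ⟨(y.1 + d.1, y.2 + d.2), ?_, ?_, ⟨h1, h2, h3, h4⟩, hwf⟩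
    · rw [pv_mem_mountains]
      exact ⟨⟨b1, b2, b3, b4⟩, hmtn⟩
    · rw [pv_mem_nbrs]
      exact ⟨d, hd, rfl⟩

theorem pv_double_sum (R C : List Int) (f : Int × Int → Int) :
    (R.map (fun r => ((C.map (fun c => f (r, c))).sum))).sum = ((R ×ˢ C).map f).sum := by
  induction R with
  | nil => simp
  | cons a R ih => simp [List.product_cons, ih, Function.comp_def]

theorem pv_A_sum (grid : List (List String)) :
    magesValley grid =
      ((PySem.List.pyRange 0 grid.length 1).map (fun r =>
        ((PySem.List.pyRange 0 (grid.headD []).length 1).map (fun c =>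
          if pvCondA grid r c then pvVal grid (r, c) else 0)).sum)).sum := by
  unfold magesValley
  have hfun : ∀ r : Int, (fun (points c : Int) =>
      if pvCell grid r c = "Water" ∨ pvCell grid r c = "Farm" then
        let value : Int := if pvCell grid r c = "Water" then 2 else 1
        if pvBreakScan grid r c pvOffs then points + value else points
      else points) = fun points c => points + (if pvCondA grid r c then pvVal grid (r, c) else 0) := by
    intro r
    funext points c
    by_cases hwf : pvCell grid r c = "Water" ∨ pvCell grid r c = "Farm" <;>
      by_cases hbk : pvBreakScan grid r c pvOffs = true <;>
        simp [pvCondA, pvVal, hwf, hbk]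
  have hinner : ∀ (a r : Int),
      (PySem.List.pyRange 0 (grid.headD []).length 1).foldl (fun points c =>
        if pvCell grid r c = "Water" ∨ pvCell grid r c = "Farm" then
          let value : Int := if pvCell grid r c = "Water" then 2 else 1
          if pvBreakScan grid r c pvOffs then points + value else points
        else points) a
      = a + ((PySem.List.pyRange 0 (grid.headD []).length 1).map (fun c =>
          if pvCondA grid r c then pvVal grid (r, c) else 0)).sum := by
    intro a r
    rw [hfun r, PySem.List.foldl_add]
  calc (PySem.List.pyRange 0 grid.length 1).foldl (fun points r =>
        (PySem.List.pyRange 0 (grid.headD []).length 1).foldl (fun points c =>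
          if pvCell grid r c = "Water" ∨ pvCell grid r c = "Farm" then
            let value : Int := if pvCell grid r c = "Water" then 2 else 1
            if pvBreakScan grid r c pvOffs then points + value else points
          else points) points) 0
      = (PySem.List.pyRange 0 grid.length 1).foldl (fun points r =>
          points + ((PySem.List.pyRange 0 (grid.headD []).length 1).map (fun c =>
            if pvCondA grid r c then pvVal grid (r, c) else 0)).sum) 0 := by
        congr 1
        funext points r
        exact hinner points r
    _ = _ := by rw [PySem.List.foldl_add, zero_add]

theorem pv_condA_eq_Qb (grid : List (List String)) (r c : Int)
    (hr : 0 ≤ r ∧ r < (grid.length : Int))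
    (hc : 0 ≤ c ∧ c < ((grid.headD []).length : Int)) :
    pvCondA grid r c = pvQb grid (r, c) := by
  rw [Bool.eq_iff_iff]
  unfold pvCondA pvQb pvInR
  simp only [Bool.and_eq_true, Bool.or_eq_true, beq_iff_eq, decide_eq_true_eq,
    List.any_eq_true, pv_breakScan_iff]
  constructor
  · rintro ⟨hwf, d, hd, h1, h2, h3, h4, hm⟩
    exact ⟨⟨⟨⟨⟨hr.1, hr.2⟩, hc.1⟩, hc.2⟩, hwf⟩, d, hd, ⟨⟨⟨h1, h2⟩, h3⟩, h4⟩, hm⟩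
  · rintro ⟨⟨-, hwf⟩, d, hd, ⟨⟨⟨h1, h2⟩, h3⟩, h4⟩, hm⟩
    exact ⟨hwf, d, hd, h1, h2, h3, h4, hm⟩

theorem magesValley_spec_aux (grid : List (List String)) :
    magesValley grid = magesValley_alt grid := by
  by_cases h0 : grid.length = 0
  · rw [pv_A_sum]
    unfold magesValley_alt
    simp [h0, PySem.List.pyRange_one]
  · rw [pv_A_sum]
    unfold magesValley_alt
    rw [if_neg h0]
    rw [PySem.List.foldl_add]
    rw [zero_add]
    -- rewrite condA -> pvQb inside the double sum, using range bounds
    have hrw : ((PySem.List.pyRange 0 grid.length 1).map (fun r =>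
        ((PySem.List.pyRange 0 (grid.headD []).length 1).map (fun c =>
          if pvCondA grid r c then pvVal grid (r, c) else 0)).sum)).sum
      = ((PySem.List.pyRange 0 grid.length 1).map (fun r =>
        ((PySem.List.pyRange 0 (grid.headD []).length 1).map (fun c =>
          if pvQb grid (r, c) then pvVal grid (r, c) else 0)).sum)).sum := by
      apply congrArg
      apply List.map_congr_left
      intro r hrmem
      apply congrArg
      apply List.map_congr_left
      intro c hcmem
      rw [PySem.List.mem_pyRange_one] at hrmem hcmem
      rw [pv_condA_eq_Qb grid r c hrmem hcmem]
    rw [hrw]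
    have hprod := pv_double_sum (PySem.List.pyRange 0 grid.length 1)
      (PySem.List.pyRange 0 (grid.headD []).length 1)
      (fun p => if pvQb grid p then pvVal grid p else 0)
    simp only at hprod
    rw [hprod, pv_sum_ite_filter]
    -- now: sums over two nodup lists with the same membership
    apply List.Perm.sum_eq
    apply List.Perm.map
    rw [List.perm_ext_iff_of_nodup]
    · intro y
      rw [List.mem_filter, pv_mem_qual]
      constructor
      · rintro ⟨_, hq⟩; exact hq
      · intro hq
        refine ⟨?_, hq⟩
        obtain ⟨y1, y2⟩ := y
        rw [List.mem_product]
        unfold pvQb pvInR at hq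
        simp only [Bool.and_eq_true, decide_eq_true_eq] at hq
        rw [PySem.List.mem_pyRange_one, PySem.List.mem_pyRange_one]
        exact ⟨⟨hq.1.1.1.1.1, hq.1.1.1.1.2⟩, hq.1.1.1.2, hq.1.1.2⟩
    · exact List.Nodup.filter (fun p => pvQb grid p) (List.Nodup.product (PySem.List.nodup_pyRange_one 0 _)
        (PySem.List.nodup_pyRange_one 0 _))
    · exact pv_nodup_outer_foldl (C := fun n : Int × Int =>
        (0 ≤ n.1 ∧ n.1 < (grid.length : Int) ∧ 0 ≤ n.2 ∧ n.2 < ((grid.headD []).length : Int)) ∧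
          (pvCell grid n.1 n.2 = "Water" ∨ pvCell grid n.1 n.2 = "Farm")) pvNbrs _ _ List.nodup_nil

-- ===== VERDICT (by name: the statement is the Claim_ definition above) =====
theorem magesValley_spec : Claim_equal_magesValley := by
  intro grid _ _
  unfold Spec_magesValley
  exact magesValley_spec_aux grid
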